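-- pv_equiv track=rewrite | github.com/RohanChimbaikar/Aura | backend/aura-model-v1/aura_v2r_receiver.py | majority_vote_repeated_nibbles
-- ===== SOURCE A (Python) =====
-- def bits4_to_nibble(bits4):
--     bits4 = [int(b) & 1 for b in bits4]
--     return (bits4[0] << 3) | (bits4[1] << 2) | (bits4[2] << 1) | bits4[3]
--
-- def nibble_to_bits4(n):
--     n = int(n) & 0x0F
--     return [(n >> 3) & 1, (n >> 2) & 1, (n >> 1) & 1, n & 1]
--
-- def majority_vote_nibble_triplet(n0, n1, n2):
--     b0 = nibble_to_bits4(n0)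
--     b1 = nibble_to_bits4(n1)
--     b2 = nibble_to_bits4(n2)
--
--     voted = []
--     for i in range(4):
--         s = b0[i] + b1[i] + b2[i]
--         voted.append(1 if s >= 2 else 0)
--     return bits4_to_nibble(voted)
--
-- def majority_vote_repeated_nibbles(pred_nibbles, repeat_factor=3):
--     assert len(pred_nibbles) % repeat_factor == 0
--     out = []
--     for i in range(0, len(pred_nibbles), repeat_factor):
--         group = pred_nibbles[i:i + repeat_factor]
--
--         if repeat_factor == 3:
--             out.append(majority_vote_nibble_triplet(group[0], group[1], group[2]))
--         else:
--             bit_lists = [nibble_to_bits4(n) for n in group]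
--             voted_bits = []
--             for b in range(4):
--                 s = sum(x[b] for x in bit_lists)
--                 voted_bits.append(1 if s >= (repeat_factor // 2 + 1) else 0)
--             out.append(bits4_to_nibble(voted_bits))
--     return out
-- ===== SOURCE B (Python) =====
-- def majority_vote_repeated_nibbles(pred_nibbles, repeat_factor=3):
--     assert len(pred_nibbles) % repeat_factor == 0
--     if repeat_factor == 3:
--         out = []
--         for i in range(0, len(pred_nibbles), 3):
--             a, b, c = (int(x) & 0x0F for x in pred_nibbles[i:i + 3])
--             out.append((a & b) | (b & c) | (a & c))
--         return out
--     threshold = repeat_factor // 2 + 1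
--     out = []
--     for i in range(0, len(pred_nibbles), repeat_factor):
--         group = [int(x) & 0x0F for x in pred_nibbles[i:i + repeat_factor]]
--         nib = 0
--         for mask in (8, 4, 2, 1):
--             if sum(1 for v in group if v & mask) >= threshold:
--                 nib |= mask
--         out.append(nib)
--     return out
-- ===== Notes on version B (the rewrite author's own statement) =====
-- stated objective: alternative
-- what changed: The repeat_factor==3 hot path drops the per-bit-position loop and bit-list helpers for the closed-form bit-parallel majority circuit (a&b)|(b&c)|(a&c) on masked nibbles, and the general branch replaces the bits4 list decomposition with direct per-mask counting over masked nibbles OR-ed into the output nibble.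
import Mathlib
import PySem

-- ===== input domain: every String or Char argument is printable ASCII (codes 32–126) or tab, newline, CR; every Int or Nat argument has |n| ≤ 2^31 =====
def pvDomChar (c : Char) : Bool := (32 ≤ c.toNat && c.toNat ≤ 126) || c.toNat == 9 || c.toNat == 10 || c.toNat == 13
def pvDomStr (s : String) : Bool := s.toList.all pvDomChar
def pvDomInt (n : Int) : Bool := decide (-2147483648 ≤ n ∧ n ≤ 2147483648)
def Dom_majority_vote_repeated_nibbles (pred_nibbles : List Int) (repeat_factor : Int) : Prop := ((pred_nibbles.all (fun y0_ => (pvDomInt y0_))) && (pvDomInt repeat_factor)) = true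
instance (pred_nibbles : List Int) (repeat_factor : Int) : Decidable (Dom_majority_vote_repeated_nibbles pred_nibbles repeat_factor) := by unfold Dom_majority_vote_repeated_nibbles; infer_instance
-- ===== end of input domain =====

-- B replaces A's per-bit-position loops with a bit-parallel majority circuit (a&b)|(b&c)|(a&c) for
-- repeat_factor == 3 and direct per-mask counting OR-ed into the nibble for other repeat factors
-- (objective: alternative; same asymptotic cost).


-- ===== PORT A =====
-- bits4_to_nibble: int(b) & 1 then (b0<<3)|(b1<<2)|(b2<<1)|b3
def pvA_bits4_to_nibble (bits4 : List Int) : Int :=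
  let b := bits4.map (fun x => PySem.Int.band x 1)
  PySem.Int.bor
    (PySem.Int.bor
      (PySem.Int.bor ((PySem.List.pyGetD b 0 0) <<< (3:Nat)) ((PySem.List.pyGetD b 1 0) <<< (2:Nat)))
      ((PySem.List.pyGetD b 2 0) <<< (1:Nat)))
    (PySem.List.pyGetD b 3 0)

-- nibble_to_bits4: n = int(n) & 0x0F; [(n>>3)&1, (n>>2)&1, (n>>1)&1, n&1]
def pvA_nibble_to_bits4 (n : Int) : List Int :=
  let m := PySem.Int.band n 15
  [PySem.Int.band (m >>> (3:Nat)) 1, PySem.Int.band (m >>> (2:Nat)) 1,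
   PySem.Int.band (m >>> (1:Nat)) 1, PySem.Int.band m 1]

def pvA_majority_vote_nibble_triplet (n0 n1 n2 : Int) : Int :=
  let b0 := pvA_nibble_to_bits4 n0
  let b1 := pvA_nibble_to_bits4 n1
  let b2 := pvA_nibble_to_bits4 n2
  let voted := (PySem.List.pyRange 0 4 1).foldl (fun voted i =>
    let s := PySem.List.pyGetD b0 i 0 + PySem.List.pyGetD b1 i 0 + PySem.List.pyGetD b2 i 0
    voted ++ [if s ≥ 2 then (1:Int) else 0]) []
  pvA_bits4_to_nibble voted

-- the assert raises outside Pre_; group[k] is pyGetD (in range on every input Pre_ admits)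
def majority_vote_repeated_nibbles (pred_nibbles : List Int) (repeat_factor : Int) : List Int :=
  (PySem.List.pyRange 0 (pred_nibbles.length : Int) repeat_factor).foldl
    (fun out i =>
      let group := PySem.List.slice pred_nibbles (some i) (some (i + repeat_factor))
      if repeat_factor = 3 then
        out ++ [pvA_majority_vote_nibble_triplet (PySem.List.pyGetD group 0 0)
                  (PySem.List.pyGetD group 1 0) (PySem.List.pyGetD group 2 0)]
      else
        let bit_lists := group.map pvA_nibble_to_bits4
        let voted_bits := (PySem.List.pyRange 0 4 1).foldl (fun vb b =>
          let s := (bit_lists.map (fun x => PySem.List.pyGetD x b 0)).sum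
          vb ++ [if s ≥ PySem.Int.floordiv repeat_factor 2 + 1 then (1:Int) else 0]) []
        out ++ [pvA_bits4_to_nibble voted_bits]) []

-- ===== PORT B =====
def pvB_mask (x : Int) : Int := PySem.Int.band x 15      -- int(x) & 0x0F

-- the assert raises outside Pre_; the 3-way unpacking is indexed with pyGetD (in range under Pre_)
def majority_vote_repeated_nibbles_alt (pred_nibbles : List Int) (repeat_factor : Int) : List Int :=
  if repeat_factor = 3 then
    (PySem.List.pyRange 0 (pred_nibbles.length : Int) 3).foldl (fun out i =>
      let g := (PySem.List.slice pred_nibbles (some i) (some (i + 3))).map pvB_mask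
      let a := PySem.List.pyGetD g 0 0
      let b := PySem.List.pyGetD g 1 0
      let c := PySem.List.pyGetD g 2 0
      out ++ [PySem.Int.bor (PySem.Int.bor (PySem.Int.band a b) (PySem.Int.band b c)) (PySem.Int.band a c)]) []
  else
    let threshold := PySem.Int.floordiv repeat_factor 2 + 1
    (PySem.List.pyRange 0 (pred_nibbles.length : Int) repeat_factor).foldl (fun out i =>
      let group := (PySem.List.slice pred_nibbles (some i) (some (i + repeat_factor))).map pvB_mask
      let nib := ([8, 4, 2, 1] : List Int).foldl (fun nib mask =>
        if (group.map (fun v => if PySem.Int.band v mask ≠ 0 then (1:Int) else 0)).sum ≥ threshold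
        then PySem.Int.bor nib mask else nib) 0
      out ++ [nib]) []

-- ===== PRECONDITION & SPEC =====
-- Pre_ excludes exactly the inputs where the Python A raises: repeat_factor == 0 (ZeroDivisionError
-- in len % repeat_factor) and len(pred_nibbles) % repeat_factor != 0 (AssertionError).
def Pre_majority_vote_repeated_nibbles (pred_nibbles : List Int) (repeat_factor : Int) : Prop :=
  repeat_factor ≠ 0 ∧ PySem.Int.mod (pred_nibbles.length : Int) repeat_factor = 0
instance (pred_nibbles : List Int) (repeat_factor : Int) : Decidable (Pre_majority_vote_repeated_nibbles pred_nibbles repeat_factor) := by unfold Pre_majority_vote_repeated_nibbles; infer_instance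

def pvWitness_majority_vote_repeated_nibbles : List Int × Int := ([1, 3, 3, 10, 10, 2], 3)

def Spec_majority_vote_repeated_nibbles (pred_nibbles : List Int) (repeat_factor : Int) (out : List Int) : Prop := out = majority_vote_repeated_nibbles_alt pred_nibbles repeat_factor
instance (pred_nibbles : List Int) (repeat_factor : Int) (out : List Int) : Decidable (Spec_majority_vote_repeated_nibbles pred_nibbles repeat_factor out) := by unfold Spec_majority_vote_repeated_nibbles; infer_instance

-- ===== CLAIM (what is proved, stated in full; the proofs are below) =====
def Claim_equal_majority_vote_repeated_nibbles : Prop := ∀ (pred_nibbles : List Int) (repeat_factor : Int), Dom_majority_vote_repeated_nibbles pred_nibbles repeat_factor → Pre_majority_vote_repeated_nibbles pred_nibbles repeat_factor → Spec_majority_vote_repeated_nibbles pred_nibbles repeat_factor (majority_vote_repeated_nibbles pred_nibbles repeat_factor)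

-- ===== LEMMAS AND PROOFS =====

-- int(x) & 0x0F is x mod 16 (Python's two's-complement & against a low-bit mask)
theorem pv_band15 (x : Int) : PySem.Int.band x 15 = x % 16 := by
  have hand : ∀ n : Nat, n &&& 15 = n % 16 := by
    intro n; have := Nat.and_two_pow_sub_one_eq_mod n 4; norm_num at this; omega
  unfold PySem.Int.band
  split_ifs with h1 h2 h2
  · show ((x.toNat &&& Int.toNat 15 : Nat) : Int) = _
    rw [show Int.toNat 15 = 15 from rfl, hand]; omega
  · norm_num at h2
  · show ((Int.toNat 15 - (Int.toNat 15 &&& (-x - 1).toNat) : Nat) : Int) = _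
    rw [show Int.toNat 15 = 15 from rfl, Nat.and_comm, hand]; omega
  · norm_num at h2

theorem pv_bits4_mod (n : Int) : pvA_nibble_to_bits4 n = pvA_nibble_to_bits4 (n % 16) := by
  unfold pvA_nibble_to_bits4
  rw [pv_band15, pv_band15, Int.emod_emod_of_dvd _ (by norm_num)]

def pvInd (n m : Int) : Int := if PySem.Int.band (pvB_mask n) m ≠ 0 then 1 else 0

set_option maxHeartbeats 2000000 in
theorem pv_key3 : ∀ a b c : Fin 16,
    pvA_bits4_to_nibble
      [if pvInd ((a:Nat):Int) 8 + pvInd ((b:Nat):Int) 8 + pvInd ((c:Nat):Int) 8 ≥ 2 then (1:Int) else 0,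
       if pvInd ((a:Nat):Int) 4 + pvInd ((b:Nat):Int) 4 + pvInd ((c:Nat):Int) 4 ≥ 2 then (1:Int) else 0,
       if pvInd ((a:Nat):Int) 2 + pvInd ((b:Nat):Int) 2 + pvInd ((c:Nat):Int) 2 ≥ 2 then (1:Int) else 0,
       if pvInd ((a:Nat):Int) 1 + pvInd ((b:Nat):Int) 1 + pvInd ((c:Nat):Int) 1 ≥ 2 then (1:Int) else 0] =
      PySem.Int.bor (PySem.Int.bor (PySem.Int.band ((a : Nat) : Int) ((b : Nat) : Int))
        (PySem.Int.band ((b : Nat) : Int) ((c : Nat) : Int)))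
        (PySem.Int.band ((a : Nat) : Int) ((c : Nat) : Int)) := by decide

theorem pv_bitsFin : ∀ a : Fin 16, pvA_nibble_to_bits4 ((a : Nat) : Int) =
    [if PySem.Int.band ((a : Nat) : Int) 8 ≠ 0 then (1:Int) else 0,
     if PySem.Int.band ((a : Nat) : Int) 4 ≠ 0 then (1:Int) else 0,
     if PySem.Int.band ((a : Nat) : Int) 2 ≠ 0 then (1:Int) else 0,
     if PySem.Int.band ((a : Nat) : Int) 1 ≠ 0 then (1:Int) else 0] := by decide

theorem pv_mask_toNat (x : Int) : pvB_mask x = (((x % 16).toNat : Nat) : Int) := by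
  unfold pvB_mask; rw [pv_band15]
  have := Int.emod_nonneg x (by norm_num : (16:Int) ≠ 0); omega

theorem pv_bitsEq (n : Int) : pvA_nibble_to_bits4 n =
    [if PySem.Int.band (pvB_mask n) 8 ≠ 0 then (1:Int) else 0,
     if PySem.Int.band (pvB_mask n) 4 ≠ 0 then (1:Int) else 0,
     if PySem.Int.band (pvB_mask n) 2 ≠ 0 then (1:Int) else 0,
     if PySem.Int.band (pvB_mask n) 1 ≠ 0 then (1:Int) else 0] := by
  have hlt : (n % 16).toNat < 16 := by
    have h1 := Int.emod_nonneg n (by norm_num : (16:Int) ≠ 0)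
    have h2 := Int.emod_lt_of_pos n (by norm_num : (0:Int) < 16); omega
  have he : n % 16 = (((n % 16).toNat : Nat) : Int) := by
    have := Int.emod_nonneg n (by norm_num : (16:Int) ≠ 0); omega
  rw [pv_bits4_mod, pv_mask_toNat, he]
  exact pv_bitsFin ⟨(n % 16).toNat, hlt⟩

theorem pv_tripSimp (x y z : Int) :
    pvA_majority_vote_nibble_triplet x y z = pvA_bits4_to_nibble
      [if pvInd x 8 + pvInd y 8 + pvInd z 8 ≥ 2 then (1:Int) else 0,
       if pvInd x 4 + pvInd y 4 + pvInd z 4 ≥ 2 then (1:Int) else 0,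
       if pvInd x 2 + pvInd y 2 + pvInd z 2 ≥ 2 then (1:Int) else 0,
       if pvInd x 1 + pvInd y 1 + pvInd z 1 ≥ 2 then (1:Int) else 0] := by
  have hr : PySem.List.pyRange 0 4 1 = [(0:Int),1,2,3] := by decide
  unfold pvA_majority_vote_nibble_triplet pvInd
  rw [hr]
  simp only [List.foldl_cons, List.foldl_nil, List.nil_append, List.cons_append, pv_bitsEq,
             PySem.List.pyGetD_ofNat', List.getD, List.getElem?_cons_succ,
             List.getElem?_cons_zero, Option.getD_some]

theorem pv_ind_cast (x m : Int) : pvInd x m = pvInd (((x % 16).toNat : Nat) : Int) m := by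
  unfold pvInd
  have h : pvB_mask (((x % 16).toNat : Nat) : Int) = pvB_mask x := by
    rw [pv_mask_toNat x, pv_mask_toNat (((x % 16).toNat : Nat) : Int)]
    have := Int.emod_nonneg x (by norm_num : (16:Int) ≠ 0)
    have := Int.emod_lt_of_pos x (by norm_num : (0:Int) < 16)
    omega
  rw [h]

theorem pv_tripEq (x y z : Int) :
    pvA_majority_vote_nibble_triplet x y z =
      PySem.Int.bor (PySem.Int.bor (PySem.Int.band (pvB_mask x) (pvB_mask y))
        (PySem.Int.band (pvB_mask y) (pvB_mask z))) (PySem.Int.band (pvB_mask x) (pvB_mask z)) := by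
  have hb : ∀ w : Int, (w % 16).toNat < 16 := by
    intro w
    have h1 := Int.emod_nonneg w (by norm_num : (16:Int) ≠ 0)
    have h2 := Int.emod_lt_of_pos w (by norm_num : (0:Int) < 16); omega
  rw [pv_tripSimp]
  simp only [pv_ind_cast x, pv_ind_cast y, pv_ind_cast z]
  rw [pv_mask_toNat x, pv_mask_toNat y, pv_mask_toNat z]
  exact pv_key3 ⟨(x % 16).toNat, hb x⟩ ⟨(y % 16).toNat, hb y⟩ ⟨(z % 16).toNat, hb z⟩

theorem pv_elemG (group : List Int) (t : Int) :
    pvA_bits4_to_nibble ((PySem.List.pyRange 0 4 1).foldl (fun vb b =>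
        vb ++ [if ((group.map pvA_nibble_to_bits4).map (fun x => PySem.List.pyGetD x b 0)).sum ≥ t
               then (1:Int) else 0]) [])
    = ([8, 4, 2, 1] : List Int).foldl (fun nib mask =>
        if ((group.map pvB_mask).map (fun v => if PySem.Int.band v mask ≠ 0 then (1:Int) else 0)).sum ≥ t
        then PySem.Int.bor nib mask else nib) 0 := by
  have hr : PySem.List.pyRange 0 4 1 = [(0:Int),1,2,3] := by decide
  rw [hr]
  simp only [List.foldl_cons, List.foldl_nil, List.map_map, Function.comp_def,
             List.nil_append, List.cons_append, pv_bitsEq,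
             PySem.List.pyGetD_ofNat', List.getD, List.getElem?_cons_succ,
             List.getElem?_cons_zero, Option.getD_some]
  split_ifs <;> decide

theorem pv_getD_map_mask (g : List Int) (i : Int) :
    PySem.List.pyGetD (g.map pvB_mask) i 0 = pvB_mask (PySem.List.pyGetD g i 0) := by
  have h0 : pvB_mask 0 = 0 := by decide
  have := PySem.List.pyGetD_map pvB_mask g i 0
  rw [h0] at this; exact this

-- ===== VERDICT (by name: the statement is the Claim_ definition above) =====
theorem majority_vote_repeated_nibbles_spec : Claim_equal_majority_vote_repeated_nibbles := by
  intro pred_nibbles repeat_factor _hdom _hpre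
  unfold Spec_majority_vote_repeated_nibbles
  by_cases h3 : repeat_factor = 3
  · subst h3
    unfold majority_vote_repeated_nibbles majority_vote_repeated_nibbles_alt
    congr 1
    funext out i
    simp only [pv_getD_map_mask, pv_tripEq, if_true]
  · unfold majority_vote_repeated_nibbles majority_vote_repeated_nibbles_alt
    simp only [if_neg h3]
    congr 1
    funext out i
    simp only [pv_elemG]
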